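-- pv_equiv track=rewrite | github.com/kant1724/vpds_ta | detection/models/a_cnn/file_processor/training_file_creator.py | char_tokenizer
-- ===== SOURCE A (Python) =====
-- exception = ['?', ' ', '.', '"', ',']
--
-- def representsInt(s):
--     try:
--         int(s)
--         return True
--     except ValueError:
--         return False
--
-- def char_tokenizer(sentence):
--     words = []
--     i = 0
--     while i < len(sentence):
--         if representsInt(sentence[i]):
--             num = ""
--             while i < len(sentence) and representsInt(sentence[i]):
--                 num += str(sentence[i])
--                 i += 1
--             words.append(num.replace('\n', ''))
--         else:
--             if sentence[i] in exception:
--                 i += 1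
--                 continue
--             words.append(sentence[i].replace('\n', ''))
--             i += 1
--     return words
-- ===== SOURCE B (Python) =====
-- exception = ['?', ' ', '.', '"', ',']
--
-- def representsInt(s):
--     try:
--         int(s)
--         return True
--     except ValueError:
--         return False
--
-- def char_tokenizer(sentence):
--     # run-chunking: split the sentence into maximal runs of equal "is a digit"
--     # key, emit each digit run as one token and each other run char by char.
--     out = []
--     i = 0
--     n = len(sentence)
--     while i < n:
--         key = representsInt(sentence[i])
--         j = i + 1
--         while j < n and representsInt(sentence[j]) == key:
--             j += 1
--         group = sentence[i:j]
--         if key: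
--             out.append(group)
--         else:
--             out.extend('' if ch == '\n' else ch for ch in group if ch not in exception)
--         i = j
--     return out
-- ===== Notes on version B (the rewrite author's own statement) =====
-- stated objective: alternative
-- what changed: B replaces A's per-character while-loop with string accumulation and continue-skips by a run-chunking pass: it splits the sentence into maximal runs of equal representsInt key, emits each digit run as one slice and each non-digit run via a filtering comprehension.
import Mathlib
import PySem

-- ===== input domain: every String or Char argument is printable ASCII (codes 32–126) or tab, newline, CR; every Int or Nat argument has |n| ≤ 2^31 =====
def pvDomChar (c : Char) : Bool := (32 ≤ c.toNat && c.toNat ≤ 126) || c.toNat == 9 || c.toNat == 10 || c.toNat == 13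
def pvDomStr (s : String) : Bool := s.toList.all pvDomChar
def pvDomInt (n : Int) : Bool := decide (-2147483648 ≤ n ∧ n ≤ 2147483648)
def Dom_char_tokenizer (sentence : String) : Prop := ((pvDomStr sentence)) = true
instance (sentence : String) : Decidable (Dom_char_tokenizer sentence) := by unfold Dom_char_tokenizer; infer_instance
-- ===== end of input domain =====

-- B re-implements A's per-character scan as a run-chunking pass over maximal
-- runs of equal representsInt key (alternative decomposition, same cost).

-- ===== PORT A =====
-- shared module helpers (same module in Python): the exception list and representsInt
def exceptionList : List String := ["?", " ", ".", "\"", ","]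

def representsInt (s : String) : Bool := (PySem.Int.ofStr? s).isSome

-- inner `while i < len(sentence) and representsInt(sentence[i]): num += ...; i += 1`
def char_tokenizer_num : List Char → String → String × List Char
  | [], num => (num, [])
  | c :: rest, num =>
    if representsInt (String.singleton c) then char_tokenizer_num rest (num.push c)
    else (num, c :: rest)

theorem char_tokenizer_num_len : ∀ (l : List Char) (num : String),
    (char_tokenizer_num l num).2.length ≤ l.length
  | [], _ => Nat.le_refl _
  | c :: rest, num => by
    unfold char_tokenizer_num
    split
    · exact Nat.le_trans (char_tokenizer_num_len rest _) (Nat.le_succ _)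
    · exact Nat.le_refl _

-- outer while loop of A, over the remaining characters
def char_tokenizer_loop : List Char → List String
  | [] => []
  | c :: rest =>
    if representsInt (String.singleton c) then
      -- first inner-loop iteration appends sentence[i] to num = ""
      let p := char_tokenizer_num rest ("".push c)
      PySem.Str.replace p.1 "\n" "" :: char_tokenizer_loop p.2
    else if exceptionList.contains (String.singleton c) then
      char_tokenizer_loop rest
    else
      PySem.Str.replace (String.singleton c) "\n" "" :: char_tokenizer_loop rest
termination_by l => l.length
decreasing_by
  · exact Nat.lt_succ_of_le (char_tokenizer_num_len rest _)
  · exact Nat.lt_succ_self _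
  · exact Nat.lt_succ_self _

def char_tokenizer (sentence : String) : List String :=
  char_tokenizer_loop sentence.toList

-- ===== PORT B =====
-- `while i < n: ... j maximal run end ...` : chunk into maximal runs of equal key
def chunkBy : List Char → List (Bool × List Char)
  | c :: rest =>
    let k := representsInt (String.singleton c)
    let p := rest.span (fun d => representsInt (String.singleton d) == k)
    (k, c :: p.1) :: chunkBy p.2
  | [] => []
termination_by l => l.length
decreasing_by
  simp only [List.span_eq_takeWhile_dropWhile]
  exact Nat.lt_succ_of_le (List.length_dropWhile_le _ _)

-- one group: a digit run is one token; a non-digit run is filtered char by char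
def emitGroup (k : Bool) (g : List Char) : List String :=
  if k then [String.ofList g]
  else g.filterMap (fun ch =>
    if exceptionList.contains (String.singleton ch) then none
    else some (if ch = '\n' then "" else String.singleton ch))

def char_tokenizer_alt (sentence : String) : List String :=
  (chunkBy sentence.toList).flatMap (fun g => emitGroup g.1 g.2)

-- ===== PRECONDITION & SPEC =====
def Spec_char_tokenizer (sentence : String) (out : List String) : Prop := out = char_tokenizer_alt sentence
instance (sentence : String) (out : List String) : Decidable (Spec_char_tokenizer sentence out) := by unfold Spec_char_tokenizer; infer_instance

-- ===== CLAIM (what is proved, stated in full; the proofs are below) =====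
def Claim_equal_char_tokenizer : Prop := ∀ (sentence : String), Dom_char_tokenizer sentence → Spec_char_tokenizer sentence (char_tokenizer sentence)

-- ===== LEMMAS AND PROOFS =====
theorem dig_newline : representsInt (String.singleton '\n') = false := by decide

-- replace.go leaves a list alone when the single-char pattern does not occur
theorem replace_go_not_mem (c : Char) : ∀ (fuel : Nat) (l acc : List Char),
    l.length ≤ fuel → c ∉ l →
    PySem.Chars.replace.go [c] [] fuel l acc = acc.reverse ++ l := by
  intro fuel
  induction fuel with
  | zero =>
    intro l acc hl _
    have : l = [] := List.eq_nil_of_length_eq_zero (Nat.le_zero.mp hl)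
    subst this; rfl
  | succ n ih =>
    intro l acc hl hm
    cases l with
    | nil => simp [PySem.Chars.replace.go]
    | cons d t =>
      have hdc : ([c].isPrefixOf (d :: t)) = false := by
        simp only [List.isPrefixOf, Bool.and_true]
        exact beq_eq_false_iff_ne.mpr (fun h => hm (h ▸ List.mem_cons_self))
      rw [PySem.Chars.replace.go, hdc]
      simp only [Bool.false_eq_true, if_false]
      rw [ih t (d :: acc) (Nat.le_of_succ_le_succ hl) (fun h => hm (List.mem_cons_of_mem _ h))]
      simp

theorem replace_not_mem (s : String) (c : Char) (h : c ∉ s.toList) :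
    PySem.Str.replace s (String.singleton c) "" = s := by
  apply String.toList_inj.mp
  rw [PySem.Str.toList_replace]
  simp only [String.toList_singleton, String.toList_empty]
  rw [PySem.Chars.replace, if_neg (by simp)]
  simpa using replace_go_not_mem c s.toList.length s.toList [] (Nat.le_refl _) h

theorem replace_singleton (c : Char) :
    PySem.Str.replace (String.singleton c) "\n" "" =
      (if c = '\n' then "" else String.singleton c) := by
  by_cases h : c = '\n'
  · subst h; decide
  · rw [if_neg h]
    have : ('\n' : Char) ∉ (String.singleton c).toList := by
      simp [String.toList_singleton]; exact fun hh => h hh.symm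
    simpa using replace_not_mem (String.singleton c) '\n' this

-- the inner num-loop is span over the digit predicate
theorem num_eq_span : ∀ (l : List Char) (num : String),
    char_tokenizer_num l num =
      (String.ofList (num.toList ++ l.takeWhile (fun d => representsInt (String.singleton d))),
       l.dropWhile (fun d => representsInt (String.singleton d)))
  | [], num => by simp [char_tokenizer_num]
  | c :: rest, num => by
    unfold char_tokenizer_num
    by_cases h : representsInt (String.singleton c) = true
    · rw [if_pos h, num_eq_span rest (num.push c)]
      simp [h]
    · rw [if_neg h]
      simp [h]

-- digit runs contain no newline
theorem not_newline_of_all_dig (l : List Char)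
    (h : ∀ x ∈ l, representsInt (String.singleton x) = true) : ('\n' : Char) ∉ l := by
  intro hm
  have := h _ hm
  rw [dig_newline] at this
  exact Bool.false_ne_true this

-- regrouping: processing chunkBy rest equals emitting rest's leading non-digit run then the rest
theorem regroup (rest : List Char) :
    (chunkBy rest).flatMap (fun g => emitGroup g.1 g.2) =
      emitGroup false (rest.takeWhile (fun d => !representsInt (String.singleton d))) ++
      (chunkBy (rest.dropWhile (fun d => !representsInt (String.singleton d)))).flatMap
        (fun g => emitGroup g.1 g.2) := by
  cases rest with
  | nil => simp [chunkBy, emitGroup]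
  | cons d rs =>
    by_cases h : representsInt (String.singleton d) = true
    · simp [h, emitGroup]
    · rw [chunkBy]
      simp only [List.span_eq_takeWhile_dropWhile]
      rw [Bool.not_eq_true] at h
      simp only [h, beq_false]
      rw [List.takeWhile_cons, List.dropWhile_cons]
      simp only [h, Bool.not_false, ite_true]
      simp [emitGroup, List.flatMap_cons]

theorem loop_eq_alt : ∀ (l : List Char),
    char_tokenizer_loop l = (chunkBy l).flatMap (fun g => emitGroup g.1 g.2)
  | [] => by simp [char_tokenizer_loop, chunkBy]
  | c :: rest => by
    rw [char_tokenizer_loop]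
    by_cases h : representsInt (String.singleton c) = true
    · rw [if_pos h, chunkBy]
      simp only [List.span_eq_takeWhile_dropWhile, h, beq_true]
      rw [num_eq_span]
      have hrep : PySem.Str.replace
          (String.ofList (c :: rest.takeWhile (fun d => representsInt (String.singleton d))))
          "\n" "" =
          String.ofList (c :: rest.takeWhile (fun d => representsInt (String.singleton d))) := by
        have hnl : ('\n' : Char) ∉ c :: rest.takeWhile (fun d => representsInt (String.singleton d)) := by
          apply not_newline_of_all_dig
          intro x hx
          rcases List.mem_cons.mp hx with hx | hx
          · subst hx; exact h
          · have := List.mem_takeWhile_imp (p := fun d => representsInt (String.singleton d)) hx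
            exact this
        have hns : ("\n" : String) = String.singleton '\n' := by decide
        rw [hns]
        exact replace_not_mem _ _ (by simpa using hnl)
      rw [loop_eq_alt (rest.dropWhile (fun d => representsInt (String.singleton d)))]
      simp [hrep, emitGroup, List.flatMap_cons]
    · rw [if_neg h, chunkBy]
      simp only [List.span_eq_takeWhile_dropWhile]
      rw [Bool.not_eq_true] at h
      simp only [h, beq_false, List.flatMap_cons]
      rw [loop_eq_alt rest, regroup rest]
      by_cases he : exceptionList.contains (String.singleton c) = true
      · rw [if_pos he]
        have he' : String.singleton c ∈ exceptionList := by simpa using he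
        simp [emitGroup, he']
      · rw [if_neg he]
        have he' : String.singleton c ∉ exceptionList := by simpa using he
        simp [emitGroup, he', replace_singleton]
termination_by l => l.length
decreasing_by
  · exact Nat.lt_succ_of_le (List.length_dropWhile_le _ _)
  · exact Nat.lt_succ_self _

-- ===== VERDICT (by name: the statement is the Claim_ definition above) =====
theorem char_tokenizer_spec : Claim_equal_char_tokenizer := by
  intro sentence _
  unfold Spec_char_tokenizer char_tokenizer char_tokenizer_alt
  exact loop_eq_alt sentence.toList
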